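-- pv_equiv track=rewrite | github.com/dDay-37/GeeksforGeeks-questions | Medium/Top k numbers in a stream/top-k-numbers-in-a-stream.py | kTop
-- ===== SOURCE A (Python) =====
-- from collections import defaultdict
--
-- def kTop(a, N, K):
--     # Code here.
--     result = []
--     count = defaultdict(int)
--     listOfNumbers = []
--     for i, v in enumerate(a):
--         count[v] += 1
--         if count[v] == 1:
--             listOfNumbers.append(v)
--         listOfNumbers.sort(key = lambda x:(-count[x], x))
--         result.append(listOfNumbers[:min(K, i + 1)])
--     return result
-- ===== SOURCE B (Python) =====
-- def kTop(a, N, K):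
--     # Maintain the distinct numbers already sorted by (-count, value); each step
--     # repositions only the incremented element instead of re-sorting the whole list.
--     result = []
--     count = {}
--     lst = []
--     for i, v in enumerate(a):
--         c = count.get(v, 0) + 1
--         count[v] = c
--         rest = [x for x in lst if x != v]
--         j = 0
--         while j < len(rest) and (-count[rest[j]], rest[j]) < (-c, v):
--             j += 1
--         lst = rest[:j] + [v] + rest[j:]
--         result.append(lst[:min(K, i + 1)])
--     return result
-- ===== Notes on version B (the rewrite author's own statement) =====
-- stated objective: alternative
-- what changed: Instead of re-sorting the whole distinct list after every stream element, B keeps the distinct numbers permanently sorted by (-count, value) and on each element removes it and re-inserts it at its new position with one linear scan.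
import Mathlib
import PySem

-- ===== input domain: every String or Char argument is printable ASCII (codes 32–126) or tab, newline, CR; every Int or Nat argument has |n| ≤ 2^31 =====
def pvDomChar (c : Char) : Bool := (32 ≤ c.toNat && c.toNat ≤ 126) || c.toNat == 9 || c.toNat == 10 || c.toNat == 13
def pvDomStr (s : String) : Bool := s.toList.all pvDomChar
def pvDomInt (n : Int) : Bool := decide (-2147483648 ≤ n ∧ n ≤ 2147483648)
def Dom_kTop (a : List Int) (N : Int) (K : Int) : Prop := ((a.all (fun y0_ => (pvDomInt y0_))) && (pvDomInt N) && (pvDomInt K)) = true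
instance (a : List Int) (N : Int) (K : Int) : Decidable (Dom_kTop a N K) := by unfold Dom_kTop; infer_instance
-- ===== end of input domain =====

-- B keeps the distinct list sorted and repositions only the incremented element
-- (one removal + one linear-scan insertion per stream element) instead of A's full re-sort each step.

-- ===== PORT A =====
-- sort key (-count[x], x) is Python's lexicographic tuple order: Lex (Int × Int)
def kTopKey (cnt : PySem.Dict Int Int) (x : Int) : Lex (Int × Int) :=
  toLex (-(cnt.getD x 0), x)

def kTopLoopA (K : Int) : List Int → Int → PySem.Dict Int Int → List Int → List (List Int) → List (List Int)
  | [], _, _, _, res => res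
  | v :: rest, i, cnt, lst, res =>
      let cnt' := cnt.modify v 0 (· + 1)                       -- count[v] += 1
      let lst1 := if cnt'.getD v 0 == 1 then lst ++ [v] else lst
      let lst2 := PySem.List.sorted lst1 (kTopKey cnt')        -- listOfNumbers.sort(key=...)
      kTopLoopA K rest (i + 1) cnt' lst2
        (res ++ [PySem.List.slice lst2 none (some (min K (i + 1)))])

def kTop (a : List Int) (N : Int) (K : Int) : List (List Int) :=
  kTopLoopA K a 0 PySem.Dict.empty [] []

-- ===== PORT B =====
-- linear scan past the elements whose key (-count, value) is below v's, then splice v in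
def kTopIns (cnt : PySem.Dict Int Int) (c : Int) (v : Int) : List Int → List Int
  | [] => [v]
  | x :: xs => if kTopKey cnt x < toLex (-c, v) then x :: kTopIns cnt c v xs else v :: x :: xs

def kTopLoopB (K : Int) : List Int → Int → PySem.Dict Int Int → List Int → List (List Int) → List (List Int)
  | [], _, _, _, res => res
  | v :: rest, i, cnt, lst, res =>
      let c := cnt.getD v 0 + 1
      let cnt' := cnt.insert v c
      let r := lst.filter (fun x => x != v)
      let lst' := kTopIns cnt' c v r
      kTopLoopB K rest (i + 1) cnt' lst'
        (res ++ [PySem.List.slice lst' none (some (min K (i + 1)))])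

def kTop_alt (a : List Int) (N : Int) (K : Int) : List (List Int) :=
  kTopLoopB K a 0 PySem.Dict.empty [] []

-- ===== PRECONDITION & SPEC =====
def Spec_kTop (a : List Int) (N : Int) (K : Int) (out : List (List Int)) : Prop := out = kTop_alt a N K
instance (a : List Int) (N : Int) (K : Int) (out : List (List Int)) : Decidable (Spec_kTop a N K out) := by unfold Spec_kTop; infer_instance

-- ===== CLAIM (what is proved, stated in full; the proofs are below) =====
def Claim_equal_kTop : Prop := ∀ (a : List Int) (N : Int) (K : Int), Dom_kTop a N K → Spec_kTop a N K (kTop a N K)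

-- ===== LEMMAS AND PROOFS =====

theorem kTopKey_injective (cnt : PySem.Dict Int Int) : Function.Injective (kTopKey cnt) := by
  intro x y h
  have := congrArg (fun p => (ofLex p).2) h
  simpa [kTopKey] using this

theorem kTopKey_insert_ne (cnt : PySem.Dict Int Int) (v c x : Int) (h : x ≠ v) :
    kTopKey (cnt.insert v c) x = kTopKey cnt x := by
  simp [kTopKey, PySem.Dict.getD_insert, h]

theorem mem_kTopIns (cnt : PySem.Dict Int Int) (c v : Int) (l : List Int) (y : Int) :
    y ∈ kTopIns cnt c v l ↔ y = v ∨ y ∈ l := by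
  induction l with
  | nil => simp [kTopIns]
  | cons x xs ih =>
      by_cases h : kTopKey cnt x < toLex (-c, v) <;>
        simp [kTopIns, h, ih] <;> tauto

theorem perm_kTopIns (cnt : PySem.Dict Int Int) (c v : Int) (l : List Int) :
    (kTopIns cnt c v l).Perm (v :: l) := by
  induction l with
  | nil => simp [kTopIns]
  | cons x xs ih =>
      by_cases h : kTopKey cnt x < toLex (-c, v)
      · simp only [kTopIns, if_pos h]
        exact ((ih.cons x).trans (List.Perm.swap v x xs))
      · simp [kTopIns, h]

theorem pairwise_kTopIns (cnt : PySem.Dict Int Int) (c v : Int) (l : List Int)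
    (hk : kTopKey cnt v = toLex (-c, v))
    (hp : l.Pairwise (fun a b => kTopKey cnt a < kTopKey cnt b))
    (hne : ∀ x ∈ l, x ≠ v) :
    (kTopIns cnt c v l).Pairwise (fun a b => kTopKey cnt a < kTopKey cnt b) := by
  induction l with
  | nil => simp [kTopIns]
  | cons x xs ih =>
      have hxv : x ≠ v := hne x (by simp)
      have hkx : kTopKey cnt x ≠ kTopKey cnt v := fun h => hxv (kTopKey_injective cnt h)
      by_cases h : kTopKey cnt x < toLex (-c, v)
      · simp only [kTopIns, if_pos h]
        refine List.Pairwise.cons ?_ (ih hp.of_cons (fun y hy => hne y (by simp [hy])))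
        intro y hy
        rcases (mem_kTopIns cnt c v xs y).1 hy with rfl | hy'
        · rw [← hk] at h; exact h
        · exact (List.pairwise_cons.1 hp).1 y hy'
      · simp only [kTopIns, if_neg h]
        have hvx : kTopKey cnt v < kTopKey cnt x := by
          rw [← hk] at h
          exact lt_of_le_of_ne (not_lt.1 h) (Ne.symm hkx)
        refine List.Pairwise.cons ?_ hp
        intro y hy
        rcases List.mem_cons.1 hy with rfl | hy'
        · exact hvx
        · exact lt_trans hvx ((List.pairwise_cons.1 hp).1 y hy')

-- the loop invariant: the list is strictly sorted by the current key and holds exactly the seen values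
def kTopInv (cnt : PySem.Dict Int Int) (l : List Int) : Prop :=
  l.Pairwise (fun a b => kTopKey cnt a < kTopKey cnt b) ∧
  (∀ x, x ∈ l ↔ 0 < cnt.getD x 0) ∧
  (∀ x, 0 ≤ cnt.getD x 0)

theorem kTop_step (cnt : PySem.Dict Int Int) (l : List Int) (v : Int) (hInv : kTopInv cnt l) :
    (PySem.List.sorted (if (cnt.modify v 0 (· + 1)).getD v 0 == 1 then l ++ [v] else l)
        (kTopKey (cnt.modify v 0 (· + 1))) =
      kTopIns (cnt.modify v 0 (· + 1)) (cnt.getD v 0 + 1) v (l.filter (fun x => x != v))) ∧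
    kTopInv (cnt.modify v 0 (· + 1))
      (kTopIns (cnt.modify v 0 (· + 1)) (cnt.getD v 0 + 1) v (l.filter (fun x => x != v))) := by
  obtain ⟨hsort, hmem, hpos⟩ := hInv
  set c := cnt.getD v 0 + 1 with hc
  set cnt' := cnt.modify v 0 (· + 1) with hcnt'
  have hcnt'i : cnt' = cnt.insert v c := rfl
  have hgetv : cnt'.getD v 0 = c := by simp [hcnt'i, PySem.Dict.getD_insert]
  have hget_ne : ∀ x : Int, x ≠ v → cnt'.getD x 0 = cnt.getD x 0 := by
    intro x hx; simp [hcnt'i, PySem.Dict.getD_insert, hx]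
  have hkv : kTopKey cnt' v = toLex (-c, v) := by simp [kTopKey, hgetv]
  set r := l.filter (fun x => x != v) with hr
  have hrne : ∀ x ∈ r, x ≠ v := by
    intro x hx; have := List.of_mem_filter hx; simpa using this
  have hrmem : ∀ x, x ∈ r ↔ (x ∈ l ∧ x ≠ v) := by
    intro x; rw [hr, List.mem_filter]; simp
  -- r is strictly sorted under the new key
  have hrsort : r.Pairwise (fun a b => kTopKey cnt' a < kTopKey cnt' b) := by
    have h1 : r.Pairwise (fun a b => kTopKey cnt a < kTopKey cnt b) := hsort.filter _
    refine List.Pairwise.imp_of_mem ?_ h1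
    intro a b ha hb hab
    rw [hcnt'i]
    rwa [kTopKey_insert_ne cnt v c a (hrne a ha), kTopKey_insert_ne cnt v c b (hrne b hb)]
  have hnodup : l.Nodup := by
    refine hsort.imp ?_
    intro a b h hab; subst hab; exact lt_irrefl _ h
  -- the two candidate lists are permutations of each other
  have hperm : (kTopIns cnt' c v r).Perm (if cnt'.getD v 0 == 1 then l ++ [v] else l) := by
    refine (perm_kTopIns cnt' c v r).trans ?_
    by_cases h0 : cnt.getD v 0 = 0
    · have : (cnt'.getD v 0 == 1) = true := by simp [hgetv, hc, h0]
      rw [this, if_pos rfl]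
      have hvnot : v ∉ l := by
        intro hv; have := (hmem v).1 hv; omega
      have : r = l := by
        rw [hr]; apply List.filter_eq_self.2
        intro x hx; simp; rintro rfl; exact hvnot hx
      rw [this]
      simpa using (List.perm_append_comm (l₁ := [v]) (l₂ := l))
    · have : (cnt'.getD v 0 == 1) = false := by
        simp only [hgetv, hc]; simp; omega
      rw [this, if_neg (by simp)]
      have hvin : v ∈ l := (hmem v).2 (by have := hpos v; omega)
      have hre : r = l.erase v := by
        rw [hr, List.Nodup.erase_eq_filter hnodup]
      exact hre ▸ (List.perm_cons_erase hvin).symm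
  have hpair := pairwise_kTopIns cnt' c v r hkv hrsort hrne
  refine ⟨PySem.List.sorted_eq_of_perm_of_pairwise_lt _ _ _ hperm ?_ , ?_, ?_, ?_⟩
  · exact hpair
  · exact hpair
  · intro x
    rw [mem_kTopIns]
    by_cases hx : x = v
    · constructor
      · intro _; rw [hx, hgetv, hc]; have := hpos v; omega
      · intro _; exact Or.inl hx
    · rw [hget_ne x hx]
      constructor
      · rintro (rfl | hxr)
        · exact absurd rfl hx
        · exact (hmem x).1 ((hrmem x).1 hxr).1
      · intro h; exact Or.inr ((hrmem x).2 ⟨(hmem x).2 h, hx⟩)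
  · intro x
    by_cases hx : x = v
    · subst hx; rw [hgetv]; have := hpos x; omega
    · rw [hget_ne x hx]; exact hpos x

theorem kTopLoop_eq (K : Int) (s : List Int) : ∀ (i : Int) (cnt : PySem.Dict Int Int)
    (l : List Int) (res : List (List Int)), kTopInv cnt l →
    kTopLoopA K s i cnt l res = kTopLoopB K s i cnt l res := by
  induction s with
  | nil => intro i cnt l res _; rfl
  | cons v rest ih =>
      intro i cnt l res hInv
      obtain ⟨heq, hInv'⟩ := kTop_step cnt l v hInv
      show kTopLoopA K rest (i + 1) _ _ _ = kTopLoopB K rest (i + 1) _ _ _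
      rw [heq]
      exact ih (i + 1) _ _ _ hInv'

theorem kTopInv_empty : kTopInv PySem.Dict.empty [] := by
  refine ⟨List.Pairwise.nil, ?_, ?_⟩ <;>
    simp [PySem.Dict.getD, PySem.Dict.get?, PySem.Dict.empty]

-- ===== VERDICT (by name: the statement is the Claim_ definition above) =====
theorem kTop_spec : Claim_equal_kTop := by
  intro a N K _
  unfold Spec_kTop kTop kTop_alt
  exact kTopLoop_eq K a 0 PySem.Dict.empty [] [] kTopInv_empty
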